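-- pv_equiv track=rewrite | github.com/youngeryoung/RE2-Return-to-AIR-Death-by-ESP8266-Rebirth-on-ESP32-C6 | ufont.py | byte_to_bit
-- ===== SOURCE A (Python) =====
-- def byte_to_bit(b, size, f):
--     """将字节列表转换为位列表"""
--     t = []
--     for i in range(size):
--         byte_val = b[i]
--         for j in range(7, -1, -1):
--             t.append((byte_val >> j) & 1)
--     a = []
--     for i in range(0, len(t), f):
--         a.append(t[i:i + f])
--     return a
-- ===== SOURCE B (Python) =====
-- def byte_to_bit(b, size, f):
--     """将字节列表转换为位列表"""
--     n = 8 * max(size, 0)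
--     return [[(b[p // 8] >> (7 - p % 8)) & 1
--              for p in range(start, min(start + f, n))]
--             for start in range(0, n, f)]
-- ===== Notes on version B (the rewrite author's own statement) =====
-- stated objective: alternative
-- what changed: B fuses A's two passes (expand bytes to a flat bit list, then chunk it into rows) into one positional-index pass: for each row start it computes each bit directly from b[p//8] by shifting, never materialising the flat bit list.
import Mathlib
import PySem

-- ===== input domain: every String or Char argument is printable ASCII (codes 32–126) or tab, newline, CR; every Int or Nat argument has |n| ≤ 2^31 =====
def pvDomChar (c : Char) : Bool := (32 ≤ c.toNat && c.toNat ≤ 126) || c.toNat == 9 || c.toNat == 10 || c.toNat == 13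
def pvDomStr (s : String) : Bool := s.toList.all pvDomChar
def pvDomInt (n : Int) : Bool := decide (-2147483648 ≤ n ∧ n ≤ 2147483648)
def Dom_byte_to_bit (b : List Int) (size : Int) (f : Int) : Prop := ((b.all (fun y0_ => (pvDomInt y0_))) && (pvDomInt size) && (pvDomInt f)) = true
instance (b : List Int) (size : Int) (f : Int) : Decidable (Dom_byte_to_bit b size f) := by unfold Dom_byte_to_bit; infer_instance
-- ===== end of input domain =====

-- B fuses A's two passes (expand to a flat bit list, then chunk) into one positional-index
-- pass computing each row's bits directly from the bytes; same asymptotic cost, no flat list.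

-- ===== PORT A =====
-- Literal transliteration of A. Python's '(x >> j) & 1' is 'PySem.Int.band (x >>> j) 1'
-- (exact: core Int '>>>' is Python's arithmetic shift; every shift amount here is ≥ 0).
-- 'b[i]' is PySem.List.pyGetD b i 0: Pre_ guarantees 0 ≤ i < b.length, where it is exact.
def byte_to_bit (b : List Int) (size : Int) (f : Int) : List (List Int) :=
  let t : List Int :=
    (PySem.List.pyRange 0 size 1).foldl (fun t i =>
      let byte_val := PySem.List.pyGetD b i 0
      (PySem.List.pyRange 7 (-1) (-1)).foldl
        (fun t j => t ++ [PySem.Int.band (byte_val >>> j) 1]) t) []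
  (PySem.List.pyRange 0 (PySem.List.len t) f).foldl
    (fun a i => a ++ [PySem.List.slice t (some i) (some (i + f))]) []

-- ===== PORT B =====
-- '(b[p // 8] >> (7 - p % 8)) & 1' for one bit position p (the shift amount is ≥ 0 here)
def pvBit (b : List Int) (p : Int) : Int :=
  PySem.Int.band
    (PySem.List.pyGetD b (PySem.Int.floordiv p 8) 0 >>> (7 - PySem.Int.mod p 8)) 1

def byte_to_bit_alt (b : List Int) (size : Int) (f : Int) : List (List Int) :=
  let n : Int := 8 * max size 0
  (PySem.List.pyRange 0 n f).map (fun start =>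
    (PySem.List.pyRange start (min (start + f) n) 1).map (fun p => pvBit b p))

-- ===== PRECONDITION & SPEC =====
-- Pre_ excludes exactly the inputs where A raises: size > len(b) (IndexError on b[i])
-- and f = 0 (ValueError from range(0, len(t), 0)).
def Pre_byte_to_bit (b : List Int) (size : Int) (f : Int) : Prop :=
  size ≤ (b.length : Int) ∧ f ≠ 0
instance (b : List Int) (size : Int) (f : Int) : Decidable (Pre_byte_to_bit b size f) := by
  unfold Pre_byte_to_bit; infer_instance

def pvWitness_byte_to_bit : List Int × Int × Int := ([5, 9], 2, 3)

def Spec_byte_to_bit (b : List Int) (size : Int) (f : Int) (out : List (List Int)) : Prop := out = byte_to_bit_alt b size f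
instance (b : List Int) (size : Int) (f : Int) (out : List (List Int)) : Decidable (Spec_byte_to_bit b size f out) := by unfold Spec_byte_to_bit; infer_instance

-- ===== CLAIM (what is proved, stated in full; the proofs are below) =====
def Claim_equal_byte_to_bit : Prop := ∀ (b : List Int) (size : Int) (f : Int), Dom_byte_to_bit b size f → Pre_byte_to_bit b size f → Spec_byte_to_bit b size f (byte_to_bit b size f)

-- ===== LEMMAS AND PROOFS =====

-- A's inner loop written as the block of 8 bits of byte i
def pvBlockA (b : List Int) (i : Int) : List Int :=
  (PySem.List.pyRange 7 (-1) (-1)).map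
    (fun j => PySem.Int.band (PySem.List.pyGetD b i 0 >>> j.toNat) 1)

lemma pvBit_8m_add (b : List Int) (m k : Nat) (hk : k < 8) :
    pvBit b ((8 * m + k : Nat) : Int)
      = PySem.Int.band (PySem.List.pyGetD b (m : Int) 0 >>> ((7:Int) - (k:Int))) 1 := by
  unfold pvBit
  have h1 : PySem.Int.floordiv ((8 * m + k : Nat) : Int) 8 = (m : Int) := by
    have := PySem.Int.floordiv_natCast (8 * m + k) 8
    rw [show ((8:Nat) : Int) = (8 : Int) from rfl] at this
    rw [this]; congr 1; omega
  have h2 : PySem.Int.mod ((8 * m + k : Nat) : Int) 8 = (k : Int) := by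
    have := PySem.Int.mod_natCast (8 * m + k) 8
    rw [show ((8:Nat) : Int) = (8 : Int) from rfl] at this
    rw [this]; congr 1; omega
  rw [h1, h2]

lemma pvBlockA_eq (b : List Int) (m : Nat) :
    pvBlockA b (m : Int)
      = (PySem.List.pyRange (8 * (m : Int)) (8 * (m : Int) + 8) 1).map (fun p => pvBit b p) := by
  have hl : PySem.List.pyRange 7 (-1) (-1) = [7, 6, 5, 4, 3, 2, 1, 0] := by decide
  have hr : PySem.List.pyRange (8 * (m : Int)) (8 * (m : Int) + 8) 1
      = [8*(m:Int), 8*(m:Int)+1, 8*(m:Int)+2, 8*(m:Int)+3,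
         8*(m:Int)+4, 8*(m:Int)+5, 8*(m:Int)+6, 8*(m:Int)+7] := by
    rw [PySem.List.pyRange_one]
    rw [show ((8 * (m : Int) + 8) - 8 * (m : Int)).toNat = 8 by omega]
    rw [show List.range 8 = [0, 1, 2, 3, 4, 5, 6, 7] from rfl]
    norm_num
  have hb : ∀ k : Nat, k < 8 → pvBit b (8 * (m : Int) + (k : Int))
      = PySem.Int.band (PySem.List.pyGetD b (m : Int) 0 >>> ((7:Int) - (k:Int))) 1 := by
    intro k hk
    have hc : (8 * (m : Int) + (k : Int)) = ((8 * m + k : Nat) : Int) := by push_cast; ring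
    rw [hc, pvBit_8m_add b m k hk]
  unfold pvBlockA
  rw [hl, hr]
  simp only [List.map, List.cons.injEq, and_true]
  refine ⟨?_, ?_, ?_, ?_, ?_, ?_, ?_, ?_⟩
  · have := hb 0 (by omega); rw [show 8*(m:Int) + ((0:Nat):Int) = 8*(m:Int) by norm_num] at this
    rw [this]
    norm_num
  · have := hb 1 (by omega); rw [show 8*(m:Int) + ((1:Nat):Int) = 8*(m:Int) + 1 by norm_num] at this
    rw [this]
    norm_num
  · have := hb 2 (by omega); rw [show 8*(m:Int) + ((2:Nat):Int) = 8*(m:Int) + 2 by norm_num] at this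
    rw [this]
    norm_num
  · have := hb 3 (by omega); rw [show 8*(m:Int) + ((3:Nat):Int) = 8*(m:Int) + 3 by norm_num] at this
    rw [this]
    norm_num
  · have := hb 4 (by omega); rw [show 8*(m:Int) + ((4:Nat):Int) = 8*(m:Int) + 4 by norm_num] at this
    rw [this]
    norm_num
  · have := hb 5 (by omega); rw [show 8*(m:Int) + ((5:Nat):Int) = 8*(m:Int) + 5 by norm_num] at this
    rw [this]
    norm_num
  · have := hb 6 (by omega); rw [show 8*(m:Int) + ((6:Nat):Int) = 8*(m:Int) + 6 by norm_num] at this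
    rw [this]
    norm_num
  · have := hb 7 (by omega); rw [show 8*(m:Int) + ((7:Nat):Int) = 8*(m:Int) + 7 by norm_num] at this
    rw [this]
    norm_num

-- the flat bit list A builds, as a map over bit positions
lemma pvFlat_eq (b : List Int) (m : Nat) :
    (PySem.List.pyRange 0 (m : Int) 1).flatMap (pvBlockA b)
      = (PySem.List.pyRange 0 (8 * (m : Int)) 1).map (fun p => pvBit b p) := by
  induction m with
  | zero => simp [PySem.List.pyRange_one_eq_nil]
  | succ m ih =>
    have h1 : ((m + 1 : Nat) : Int) = (m : Int) + 1 := by push_cast; ring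
    rw [h1, PySem.List.pyRange_one_succ_right (by positivity)]
    have h2 : 8 * ((m : Int) + 1) = 8 * (m : Int) + 8 := by ring
    rw [h2, PySem.List.pyRange_one_append 0 (8 * (m : Int)) (8 * (m : Int) + 8)
          (by positivity) (by omega)]
    rw [List.flatMap_append, List.map_append, ih]
    simp [pvBlockA_eq]

lemma pvSlice_map_pyRange (g : Int → Int) (N a c : Int) (h0 : 0 ≤ a) (hac : a ≤ c) :
    PySem.List.slice ((PySem.List.pyRange 0 N 1).map g) (some a) (some c)
      = (PySem.List.pyRange a (min c N) 1).map g := by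
  rw [PySem.List.slice_toNat _ h0 (by omega)]
  apply List.ext_getElem
  · simp only [List.length_take, List.length_drop, List.length_map,
      PySem.List.length_pyRange_one]
    omega
  · intro k hk1 hk2
    simp only [List.getElem_take, List.getElem_drop, List.getElem_map]
    rw [PySem.List.getElem_pyRange_one, PySem.List.getElem_pyRange_one]
    congr 1
    simp only [List.length_take, List.length_drop, List.length_map,
      PySem.List.length_pyRange_one] at hk1
    omega

-- rewrite A into map form
lemma pvA_eq (b : List Int) (size f : Int) :
    byte_to_bit b size f
      = (PySem.List.pyRange 0
            (PySem.List.len ((PySem.List.pyRange 0 size 1).flatMap (pvBlockA b))) f).map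
          (fun i => PySem.List.slice ((PySem.List.pyRange 0 size 1).flatMap (pvBlockA b))
            (some i) (some (i + f))) := by
  unfold byte_to_bit
  simp only [PySem.List.foldl_append_singleton_eq_map, List.nil_append]
  have hblk : ∀ i : Int,
      List.map (fun j => PySem.Int.band (PySem.List.pyGetD b i 0 >>> j) 1)
        (PySem.List.pyRange 7 (-1) (-1)) = pvBlockA b i := fun _ => rfl
  simp only [hblk, PySem.List.foldl_append_eq_flatMap, List.nil_append]

lemma pyRange_nil_of_nonneg_neg (n f : Int) (h : 0 ≤ n) (hf : f < 0) :
    PySem.List.pyRange 0 n f = [] := by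
  simp only [PySem.List.pyRange]
  split_ifs <;> simp_all <;> omega

-- ===== VERDICT (by name: the statement is the Claim_ definition above) =====
lemma pyRange_zero_zero (f : Int) : PySem.List.pyRange 0 0 f = [] := by
  simp only [PySem.List.pyRange]
  split_ifs <;> simp_all

-- ===== VERDICT (by name: the statement is the Claim_ definition above) =====
theorem byte_to_bit_spec : Claim_equal_byte_to_bit := by
  intro b size f _ hpre
  obtain ⟨hsz, hf⟩ := hpre
  unfold Spec_byte_to_bit byte_to_bit_alt
  rw [pvA_eq]
  by_cases hs : size ≤ 0
  · -- size ≤ 0: both outer ranges are over n = 0 (A: len [] = 0; B: 8*max size 0 = 0)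
    have hmax : max size 0 = 0 := by omega
    rw [PySem.List.pyRange_one_eq_nil hs, hmax]
    simp only [List.flatMap_nil, mul_zero]
    rw [show PySem.List.len ([] : List Int) = 0 from rfl, pyRange_zero_zero f]
    simp
  · have hs' : 0 < size := by omega
    have hmax : max size 0 = size := by omega
    have hsn : size = ((size.toNat : Nat) : Int) := by omega
    have hflat : (PySem.List.pyRange 0 size 1).flatMap (pvBlockA b)
        = (PySem.List.pyRange 0 (8 * size) 1).map (fun p => pvBit b p) := by
      rw [hsn]; exact pvFlat_eq b size.toNat
    rw [hflat, hmax]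
    have hlen : PySem.List.len ((PySem.List.pyRange 0 (8 * size) 1).map (fun p => pvBit b p))
        = 8 * size := by
      simp [PySem.List.len_eq, PySem.List.length_pyRange_one]
      omega
    rw [hlen]
    rcases lt_or_gt_of_ne hf with hneg | hpos
    · have hnil := pyRange_nil_of_nonneg_neg (8 * size) f (by omega) hneg
      simp [hnil]
    · apply List.map_congr_left
      intro i hi
      obtain ⟨hi1, hi2, -⟩ := (PySem.List.mem_pyRange_iff_of_pos hpos i).1 hi
      exact pvSlice_map_pyRange (fun p => pvBit b p) (8 * size) i (i + f) hi1 (by omega)
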